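-- pv_equiv track=rewrite | github.com/lukekasper/Personal-Projects | Python_Practice/arrays.py | max_sum_path
-- ===== SOURCE A (Python) =====
-- def max_sum_path(a, b):
--     suma = sumb = i = j = 0
--     while i < len(a) and j < len(b):
--         if a[i] < b[j]:
--             suma += a[i]
--             i += 1
--         elif a[i] > b[j]:
--             sumb += b[j]
--             j += 1
--         else:
--             suma += a[i]
--             sumb += b[j]
--             suma = sumb = max(suma, sumb)
--             i += 1
--             j += 1
--
--     while i < len(a):
--         suma += a[i]
--         i += 1
--
--     while j < len(b):
--         sumb += b[j]
--         j += 1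
--
--     return max(suma, sumb)
-- ===== SOURCE B (Python) =====
-- def max_sum_path(a, b):
--     # Staged approach: prefix-sum arrays, a list of cut points at common
--     # elements, then one comprehension summing max segment sums.
--     pa = [0]
--     for x in a:
--         pa.append(pa[-1] + x)
--     pb = [0]
--     for y in b:
--         pb.append(pb[-1] + y)
--     cuts = [(0, 0)]
--     i = j = 0
--     while i < len(a) and j < len(b):
--         if a[i] < b[j]:
--             i += 1
--         elif a[i] > b[j]:
--             j += 1
--         else:
--             i += 1
--             j += 1
--             cuts.append((i, j))
--     cuts.append((len(a), len(b)))
--     return sum(max(pa[i1] - pa[i0], pb[j1] - pb[j0])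
--                for (i0, j0), (i1, j1) in zip(cuts, cuts[1:]))
-- ===== Notes on version B (the rewrite author's own statement) =====
-- stated objective: alternative
-- what changed: Replaces A's running-sum merge with a staged algorithm: build prefix-sum arrays for both lists, collect only the cut index pairs at common elements in an index-only merge, then compute the answer as a sum of per-segment maxima read off the prefix arrays.
import Mathlib
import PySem

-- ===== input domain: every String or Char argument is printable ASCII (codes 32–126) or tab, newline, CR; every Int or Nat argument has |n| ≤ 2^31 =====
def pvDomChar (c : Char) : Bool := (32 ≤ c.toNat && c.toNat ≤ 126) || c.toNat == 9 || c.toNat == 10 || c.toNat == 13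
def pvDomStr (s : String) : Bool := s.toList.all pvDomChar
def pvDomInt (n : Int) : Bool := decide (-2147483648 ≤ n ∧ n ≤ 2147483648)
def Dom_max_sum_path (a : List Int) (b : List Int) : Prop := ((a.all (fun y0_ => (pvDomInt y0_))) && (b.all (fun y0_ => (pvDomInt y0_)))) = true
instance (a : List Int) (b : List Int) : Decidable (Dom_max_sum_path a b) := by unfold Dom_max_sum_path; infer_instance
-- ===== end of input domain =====

-- B replaces A's running-sum merge by a staged algorithm (prefix-sum arrays, index cut pairs at
-- common elements, then a sum of per-segment maxima); objective: alternative, same cost.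

-- ===== PORT A =====
-- the two trailing 'while' loops of A: add every remaining element into the running sum
def pvAddAll : Int → List Int → Int
  | s, [] => s
  | s, x :: xs => pvAddAll (s + x) xs

-- A's main merge loop carrying the two equalized running sums; on exit (one list
-- exhausted) the two tail loops run and max(suma, sumb) is returned
def pvMergeA : List Int → List Int → Int → Int → Int
  | x :: xs, y :: ys, suma, sumb =>
    if x < y then pvMergeA xs (y :: ys) (suma + x) sumb
    else if y < x then pvMergeA (x :: xs) ys suma (sumb + y)
    else pvMergeA xs ys (max (suma + x) (sumb + y)) (max (suma + x) (sumb + y))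
  | [], b, suma, sumb => max suma (pvAddAll sumb b)
  | a, [], suma, sumb => max (pvAddAll suma a) sumb
  termination_by a b _ _ => a.length + b.length
  decreasing_by all_goals first | (simp; done) | (simp; omega)

def max_sum_path (a : List Int) (b : List Int) : Int := pvMergeA a b 0 0

-- ===== PORT B =====
-- 'pa.append(pa[-1] + x)': the running last entry is the running sum s
def pvPrefixAux : List Int → Int → List Int
  | [], _ => []
  | x :: xs, s => (s + x) :: pvPrefixAux xs (s + x)

-- the prefix-sum array [0, a0, a0+a1, ...] built by B's first two loops
def pvPrefix (xs : List Int) : List Int := 0 :: pvPrefixAux xs 0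

-- B's index-only merge: records the index pair just past each common element
def pvCuts : List Int → List Int → Nat → Nat → List (Nat × Nat)
  | x :: xs, y :: ys, i, j =>
    if x < y then pvCuts xs (y :: ys) (i + 1) j
    else if y < x then pvCuts (x :: xs) ys i (j + 1)
    else (i + 1, j + 1) :: pvCuts xs ys (i + 1) (j + 1)
  | a, b, i, j => [(i + a.length, j + b.length)]
  termination_by a b _ _ => a.length + b.length
  decreasing_by all_goals first | (simp; done) | (simp; omega)

-- B's final comprehension: sum of max segment sums over consecutive cut pairs
def pvSegSum (pa pb : List Int) : List (Nat × Nat) → Int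
  | (i0, j0) :: (i1, j1) :: rest =>
      max (pa.getD i1 0 - pa.getD i0 0) (pb.getD j1 0 - pb.getD j0 0)
        + pvSegSum pa pb ((i1, j1) :: rest)
  | _ => 0

def max_sum_path_alt (a : List Int) (b : List Int) : Int :=
  pvSegSum (pvPrefix a) (pvPrefix b) ((0, 0) :: pvCuts a b 0 0)

-- ===== PRECONDITION & SPEC =====
def Spec_max_sum_path (a : List Int) (b : List Int) (out : Int) : Prop := out = max_sum_path_alt a b
instance (a : List Int) (b : List Int) (out : Int) : Decidable (Spec_max_sum_path a b out) := by unfold Spec_max_sum_path; infer_instance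

-- ===== CLAIM =====
def Claim_equal_max_sum_path : Prop := ∀ (a : List Int) (b : List Int), Dom_max_sum_path a b → Spec_max_sum_path a b (max_sum_path a b)

-- ===== LEMMAS AND PROOFS =====
theorem pvMergeA_nil_left (b : List Int) (suma sumb : Int) :
    pvMergeA [] b suma sumb = max suma (pvAddAll sumb b) := by
  cases b <;> simp [pvMergeA]

theorem pvMergeA_nil_right (a : List Int) (suma sumb : Int) :
    pvMergeA a [] suma sumb = max (pvAddAll suma a) sumb := by
  cases a <;> simp [pvMergeA, pvAddAll]

theorem pvAddAll_eq (xs : List Int) : ∀ s : Int, pvAddAll s xs = s + xs.sum := by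
  induction xs with
  | nil => intro s; simp [pvAddAll]
  | cons x xs ih => intro s; simp [pvAddAll, ih]; ring

theorem pvMergeA_shift_gen (a b : List Int) (s t : Int) : ∀ c u v : Int,
    s = c + u → t = c + v → pvMergeA a b s t = c + pvMergeA a b u v := by
  induction a, b, s, t using pvMergeA.induct with
  | case1 x xs y ys s t hlt ih =>
    intro c u v hs ht
    rw [pvMergeA]; simp only [if_pos hlt]
    rw [ih c (u + x) v (by omega) ht, pvMergeA]; simp only [if_pos hlt]
  | case2 x xs y ys s t hnlt hgt ih =>
    intro c u v hs ht
    rw [pvMergeA]; simp only [if_neg hnlt, if_pos hgt]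
    rw [ih c u (v + y) hs (by omega), pvMergeA]; simp only [if_neg hnlt, if_pos hgt]
  | case3 x xs y ys s t hnlt hngt ih =>
    intro c u v hs ht
    rw [pvMergeA]; simp only [if_neg hnlt, if_neg hngt]
    rw [ih c (max (u + x) (v + y)) (max (u + x) (v + y)) (by omega) (by omega), pvMergeA]
    simp only [if_neg hnlt, if_neg hngt]
  | case4 b s t =>
    intro c u v hs ht
    rw [pvMergeA_nil_left, pvMergeA_nil_left, pvAddAll_eq, pvAddAll_eq]; omega
  | case5 a s t h =>
    intro c u v hs ht
    rw [pvMergeA_nil_right, pvMergeA_nil_right, pvAddAll_eq, pvAddAll_eq]; omega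

theorem pvMergeA_shift (a b : List Int) (c u v : Int) :
    pvMergeA a b (c + u) (c + v) = c + pvMergeA a b u v :=
  pvMergeA_shift_gen a b _ _ c u v rfl rfl

theorem pvPrefixAux_getD (A : List Int) : ∀ (s : Int) (k : Nat), k < A.length →
    (pvPrefixAux A s).getD k 0 = s + (A.take (k + 1)).sum := by
  induction A with
  | nil => intro s k h; simp at h
  | cons x xs ih =>
    intro s k h
    cases k with
    | zero => simp [pvPrefixAux]
    | succ k =>
      simp only [pvPrefixAux, List.getD_cons_succ]
      rw [ih (s + x) k (by simpa using h)]
      simp [List.take_succ_cons]; ring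

theorem pvPrefix_getD (A : List Int) : ∀ k : Nat, k ≤ A.length →
    (pvPrefix A).getD k 0 = (A.take k).sum := by
  intro k hk
  cases k with
  | zero => simp [pvPrefix]
  | succ k =>
    simp only [pvPrefix, List.getD_cons_succ]
    rw [pvPrefixAux_getD A 0 k (by omega)]; simp

theorem pvCuts_nil_left (b : List Int) (i j : Nat) :
    pvCuts [] b i j = [(i, j + b.length)] := by
  cases b <;> simp [pvCuts]

theorem pvCuts_nil_right (a : List Int) (i j : Nat) :
    pvCuts a [] i j = [(i + a.length, j)] := by
  cases a <;> simp [pvCuts]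

theorem pvDropLt (A : List Int) (i : Nat) (x : Int) (xs : List Int)
    (h : A.drop i = x :: xs) : i < A.length := by
  by_contra hc
  rw [List.drop_eq_nil_of_le (by omega)] at h
  simp at h

theorem pvDropSucc (A : List Int) (i : Nat) (x : Int) (xs : List Int)
    (h : A.drop i = x :: xs) : A.drop (i + 1) = xs := by
  rw [← List.tail_drop, h]
  rfl

theorem pvSumTakeSucc (A : List Int) (i : Nat) (x : Int) (xs : List Int)
    (h : A.drop i = x :: xs) : (A.take (i + 1)).sum = (A.take i).sum + x := by
  have hx : A[i]? = some x := by
    have h0 : (List.drop i A)[0]? = A[i + 0]? := List.getElem?_drop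
    rw [h] at h0
    simpa using h0.symm
  rw [List.take_add_one, hx]
  simp

theorem pvMain (A B : List Int) : ∀ (a b : List Int) (i j : Nat),
    A.drop i = a → B.drop j = b → i ≤ A.length → j ≤ B.length →
    ∀ i0 j0 : Nat, i0 ≤ i → j0 ≤ j →
    pvSegSum (pvPrefix A) (pvPrefix B) ((i0, j0) :: pvCuts a b i j)
      = pvMergeA a b ((A.take i).sum - (A.take i0).sum) ((B.take j).sum - (B.take j0).sum) := by
  intro a b i j
  induction a, b, i, j using pvCuts.induct with
  | case1 x xs y ys i j hlt ih =>
    intro hA hB hi hj i0 j0 hi0 hj0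
    have hi' := pvDropLt A i x xs hA
    rw [pvCuts]; simp only [if_pos hlt]
    rw [ih (pvDropSucc A i x xs hA) hB (by omega) hj i0 j0 (by omega) hj0]
    rw [pvMergeA]; simp only [if_pos hlt]
    rw [pvSumTakeSucc A i x xs hA]
    congr 1
    ring
  | case2 x xs y ys i j hnlt hgt ih =>
    intro hA hB hi hj i0 j0 hi0 hj0
    have hj' := pvDropLt B j y ys hB
    rw [pvCuts]; simp only [if_neg hnlt, if_pos hgt]
    rw [ih hA (pvDropSucc B j y ys hB) hi (by omega) i0 j0 hi0 (by omega)]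
    rw [pvMergeA]; simp only [if_neg hnlt, if_pos hgt]
    rw [pvSumTakeSucc B j y ys hB]
    congr 1
    ring
  | case3 x xs y ys i j hnlt hngt ih =>
    intro hA hB hi hj i0 j0 hi0 hj0
    have hi' := pvDropLt A i x xs hA
    have hj' := pvDropLt B j y ys hB
    have hxy : x = y := by omega
    rw [pvCuts]; simp only [if_neg hnlt, if_neg hngt]
    rw [pvSegSum]
    rw [ih (pvDropSucc A i x xs hA) (pvDropSucc B j y ys hB) (by omega) (by omega)
        (i + 1) (j + 1) le_rfl le_rfl]
    simp only [sub_self]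
    rw [pvMergeA]; simp only [if_neg hnlt, if_neg hngt]
    have hshift := pvMergeA_shift xs ys
      (max ((List.take i A).sum - (List.take i0 A).sum + x)
           ((List.take j B).sum - (List.take j0 B).sum + y)) 0 0
    rw [add_zero] at hshift
    rw [hshift]
    rw [pvPrefix_getD A (i + 1) (by omega), pvPrefix_getD B (j + 1) (by omega),
        pvPrefix_getD A i0 (by omega), pvPrefix_getD B j0 (by omega),
        pvSumTakeSucc A i x xs hA, pvSumTakeSucc B j y ys hB]
    omega
  | case4 a b i j hcon =>
    intro hA hB hi hj i0 j0 hi0 hj0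
    cases a with
    | nil =>
      rw [pvCuts_nil_left]
      simp only [pvSegSum]
      have hlen : j + b.length = B.length := by
        rw [← hB, List.length_drop]; omega
      rw [pvMergeA_nil_left, pvAddAll_eq]
      have hsum : b.sum = B.sum - (B.take j).sum := by
        have := List.sum_take_add_sum_drop B j
        rw [hB] at this; omega
      rw [hlen, pvPrefix_getD A i hi, pvPrefix_getD B B.length le_rfl,
          pvPrefix_getD A i0 (by omega), pvPrefix_getD B j0 (by omega),
          List.take_length]
      omega
    | cons x xs =>
      cases b with
      | nil =>
        rw [pvCuts_nil_right]
        simp only [pvSegSum]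
        have hlen : i + (x :: xs).length = A.length := by
          rw [← hA, List.length_drop]
          have := pvDropLt A i x xs hA
          omega
        rw [pvMergeA_nil_right, pvAddAll_eq]
        have hsum : (x :: xs).sum = A.sum - (A.take i).sum := by
          have := List.sum_take_add_sum_drop A i
          rw [hA] at this; omega
        rw [hlen, pvPrefix_getD A A.length le_rfl, pvPrefix_getD B j hj,
            pvPrefix_getD A i0 (by omega), pvPrefix_getD B j0 (by omega),
            List.take_length]
        omega
      | cons y ys => exact absurd rfl (fun h => hcon x xs y ys h rfl)

-- ===== VERDICT =====
theorem max_sum_path_spec : Claim_equal_max_sum_path := by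
  intro a b _
  unfold Spec_max_sum_path max_sum_path max_sum_path_alt
  have h := pvMain a b a b 0 0 rfl rfl (by simp) (by simp) 0 0 (le_refl 0) (le_refl 0)
  simp at h
  simp [h]
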